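-- pv_equiv track=rewrite | github.com/ghazalbn/Competitive-Programming | Exams/E2/3.py | dfs
-- ===== SOURCE A (Python) =====
-- def dfs(current, previous, flowers, count, graph, f, end):
--     if flowers > f:
--         return 0
--     elif current == end:
--         return 1
--     for city in graph[current]:
--         if city != previous:
--             return dfs(city, current, graph[city][current], count, graph, f, end)
-- ===== SOURCE B (Python) =====
-- def _dfs_step(state, graph, f, end):
--     # one transition of the walk: (done?, result-or-next-state)
--     current, previous, flowers = state
--     if flowers > f:
--         return (True, 0)
--     if current == end:
--         return (True, 1)
--     nxt = next((city for city in graph[current] if city != previous), None)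
--     if nxt is None:
--         return (True, None)
--     return (False, (nxt, current, graph[nxt][current]))
--
--
-- def dfs(current, previous, flowers, count, graph, f, end):
--     # iterative driver over an explicit step function; O(1) stack
--     state = (current, previous, flowers)
--     while True:
--         done, value = _dfs_step(state, graph, f, end)
--         if done:
--             return value
--         state = value
-- ===== Notes on version B (the rewrite author's own statement) =====
-- stated objective: alternative
-- what changed: Replaces A's self-recursion nested inside the neighbour for-loop by a pure step function (state -> done/next-state, neighbour chosen with next() over a generator) driven by an iterative while-loop, so no call stack is used.
import Mathlib
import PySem

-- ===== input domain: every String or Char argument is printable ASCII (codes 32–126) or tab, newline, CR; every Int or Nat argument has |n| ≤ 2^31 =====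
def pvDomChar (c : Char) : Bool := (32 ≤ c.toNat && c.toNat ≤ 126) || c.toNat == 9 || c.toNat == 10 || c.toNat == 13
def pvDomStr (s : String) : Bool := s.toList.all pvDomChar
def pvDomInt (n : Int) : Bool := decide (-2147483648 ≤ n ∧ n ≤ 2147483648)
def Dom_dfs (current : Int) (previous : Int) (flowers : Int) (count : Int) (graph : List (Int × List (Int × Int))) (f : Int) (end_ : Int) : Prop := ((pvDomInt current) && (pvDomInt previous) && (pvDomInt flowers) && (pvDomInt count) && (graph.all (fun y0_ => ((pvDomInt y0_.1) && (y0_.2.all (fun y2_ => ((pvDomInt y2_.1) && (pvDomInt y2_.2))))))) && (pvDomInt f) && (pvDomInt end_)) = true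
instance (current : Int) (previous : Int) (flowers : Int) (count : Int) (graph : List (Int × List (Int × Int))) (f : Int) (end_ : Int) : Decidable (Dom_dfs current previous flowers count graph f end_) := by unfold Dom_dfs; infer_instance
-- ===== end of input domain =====

-- B replaces A's recursion-inside-the-for-loop by a pure step function driven by an
-- iterative loop; return values only, equal on Pre_ (inputs where the Python A returns).

-- ===== PORT A =====
-- A's for-loop: scan the keys of graph[current]; at the first city ≠ previous look up
-- graph[city] and graph[city][current] (KeyError → none) and recurse
def dfsFor (recur : Int → Int → Int → Option Int) (previous : Int) (current : Int)
    (graph : List (Int × List (Int × Int))) (adj : List (Int × Int)) : Option Int :=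
  match adj with
  | [] => none
  | (city, _) :: rest =>
    if city ≠ previous then
      match List.lookup city graph with
      | none => none            -- KeyError graph[city] (outside Pre_)
      | some adj2 =>
        match List.lookup current adj2 with
        | none => none          -- KeyError graph[city][current] (outside Pre_)
        | some w => recur city current w
    else dfsFor recur previous current graph rest

-- fuel only guards totality; Pre_ admits only inputs whose Python walk is shorter
def dfsA : Nat → Int → Int → Int → Int → List (Int × List (Int × Int)) → Int → Int → Option Int
  | 0, _, _, _, _, _, _, _ => none
  | Nat.succ n, current, previous, flowers, count, graph, f, end_ =>
    if flowers > f then some 0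
    else if current = end_ then some 1
    else
      match List.lookup current graph with
      | none => none            -- KeyError graph[current] (outside Pre_)
      | some adj =>
        dfsFor (fun city cur w => dfsA n city cur w count graph f end_) previous current graph adj

def dfs (current : Int) (previous : Int) (flowers : Int) (count : Int) (graph : List (Int × List (Int × Int))) (f : Int) (end_ : Int) : Option Int :=
  dfsA (graph.length + 2) current previous flowers count graph f end_

-- ===== PORT B =====
-- B's step function: Sum.inl = done with this result, Sum.inr = next state
def dfsStep (graph : List (Int × List (Int × Int))) (f : Int) (end_ : Int)
    (st : Int × Int × Int) : Sum (Option Int) (Int × Int × Int) :=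
  match st with
  | (current, previous, flowers) =>
    if flowers > f then Sum.inl (some 0)
    else if current = end_ then Sum.inl (some 1)
    else
      match List.lookup current graph with
      | none => Sum.inl none    -- KeyError graph[current] (outside Pre_)
      | some adj =>
        match adj.find? (fun p => p.1 != previous) with
        | none => Sum.inl none  -- next(…, None) found nothing: the walk falls off, None
        | some (city, _) =>
          match List.lookup city graph with
          | none => Sum.inl none   -- KeyError graph[nxt] (outside Pre_)
          | some adj2 =>
            match List.lookup current adj2 with
            | none => Sum.inl none -- KeyError graph[nxt][current] (outside Pre_)
            | some w => Sum.inr (city, current, w)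

-- B's while-loop driver; fuel only guards totality
def dfsRun (graph : List (Int × List (Int × Int))) (f : Int) (end_ : Int) :
    Nat → Int × Int × Int → Option Int
  | 0, _ => none
  | Nat.succ n, st =>
    match dfsStep graph f end_ st with
    | Sum.inl r => r
    | Sum.inr st' => dfsRun graph f end_ n st'

def dfs_alt (current : Int) (previous : Int) (flowers : Int) (count : Int) (graph : List (Int × List (Int × Int))) (f : Int) (end_ : Int) : Option Int :=
  dfsRun graph f end_ (graph.length + 2) (current, previous, flowers)

-- ===== PRECONDITION & SPEC =====
-- helpers describing graph SHAPE only (no simulation of the walk)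
def pvKeys (graph : List (Int × List (Int × Int))) : List Int := graph.map Prod.fst

-- every edge is mirrored: j ∈ graph[i] → i ∈ graph[j]
def pvSymmetric (graph : List (Int × List (Int × Int))) : Bool :=
  graph.all (fun e => e.2.all (fun p =>
    match List.lookup p.1 graph with
    | none => false
    | some adj2 => (List.lookup e.1 adj2).isSome))

-- number of neighbours of v lying in the active vertex set S
def pvDegIn (graph : List (Int × List (Int × Int))) (S : List Int) (v : Int) : Nat :=
  (((List.lookup v graph).getD []).filter (fun p => S.contains p.1)).length

-- repeatedly prune vertices of degree ≤ 1; a (symmetric, loop-free) graph is a forest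
-- iff everything gets pruned
def pvPrune (graph : List (Int × List (Int × Int))) : Nat → List Int → List Int
  | 0, S => S
  | Nat.succ n, S => pvPrune graph n (S.filter (fun v => 2 ≤ pvDegIn graph S v))

def pvForest (graph : List (Int × List (Int × Int))) : Bool :=
  pvPrune graph (pvKeys graph).length (pvKeys graph) = []

def pvGoodGraph (graph : List (Int × List (Int × Int))) : Bool :=
  (pvKeys graph).Nodup && graph.all (fun e => (e.2.map Prod.fst).Nodup) &&
  graph.all (fun e => e.2.all (fun p => p.1 != e.1)) && pvSymmetric graph && pvForest graph

-- Pre_dfs admits exactly the shapes on which the Python A returns normally: an immediate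
-- return (flowers > f, or current = end, or every key of graph[current] equals previous so
-- the for-loop falls off), or a walk on a duplicate-key-free, loop-free, symmetric forest,
-- where every step's lookups succeed and the walk provably stops within |graph| steps.
-- Excluded: inputs where A raises (KeyError on a vertex missing along the walk,
-- RecursionError on a cyclic walk) and, with them, deep walks on malformed (non-forest or
-- asymmetric) graphs that happen to return before the next missing key — their fate cannot
-- be stated without running the walk (see cites in claim.json for one such excluded input).
def Pre_dfs (current : Int) (previous : Int) (flowers : Int) (count : Int) (graph : List (Int × List (Int × Int))) (f : Int) (end_ : Int) : Prop :=
  flowers > f ∨ current = end_ ∨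
  ((graph.any (fun e => e.1 == current) ∧
    graph.all (fun e => e.1 != current || e.2.all (fun p => p.1 == previous))) = true) ∨
  ((pvGoodGraph graph && graph.any (fun e => e.1 == current)) = true)

instance (current : Int) (previous : Int) (flowers : Int) (count : Int) (graph : List (Int × List (Int × Int))) (f : Int) (end_ : Int) : Decidable (Pre_dfs current previous flowers count graph f end_) := by unfold Pre_dfs; infer_instance

def pvWitness_dfs : Int × Int × Int × Int × (List (Int × List (Int × Int))) × Int × Int :=
  (2, -1, 0, 0, [(2, [(3, 1)]), (3, [(2, 4)])], 5, 3)

def Spec_dfs (current : Int) (previous : Int) (flowers : Int) (count : Int) (graph : List (Int × List (Int × Int))) (f : Int) (end_ : Int) (out : Option Int) : Prop := out = dfs_alt current previous flowers count graph f end_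
instance (current : Int) (previous : Int) (flowers : Int) (count : Int) (graph : List (Int × List (Int × Int))) (f : Int) (end_ : Int) (out : Option Int) : Decidable (Spec_dfs current previous flowers count graph f end_ out) := by unfold Spec_dfs; infer_instance

-- ===== CLAIM (what is proved, stated in full; the proofs are below) =====
def Claim_equal_dfs : Prop := ∀ (current : Int) (previous : Int) (flowers : Int) (count : Int) (graph : List (Int × List (Int × Int))) (f : Int) (end_ : Int), Dom_dfs current previous flowers count graph f end_ → Pre_dfs current previous flowers count graph f end_ → Spec_dfs current previous flowers count graph f end_ (dfs current previous flowers count graph f end_)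

-- ===== LEMMAS AND PROOFS =====

-- A's for-loop equals: find the first neighbour ≠ previous, then act on it once
theorem dfsFor_eq_find (recur : Int → Int → Int → Option Int) (previous current : Int)
    (graph : List (Int × List (Int × Int))) (adj : List (Int × Int)) :
    dfsFor recur previous current graph adj =
      match adj.find? (fun p => p.1 != previous) with
      | none => none
      | some (city, _) =>
        match List.lookup city graph with
        | none => none
        | some adj2 =>
          match List.lookup current adj2 with
          | none => none
          | some w => recur city current w := by
  induction adj with
  | nil => rfl
  | cons hd tl ih =>
    obtain ⟨city, wt⟩ := hd
    by_cases h : city ≠ previous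
    · have hb : (city != previous) = true := by simpa using h
      simp [dfsFor, List.find?, h, hb]
    · simp only [ne_eq, not_not] at h
      have hb : (city != previous) = false := by simp [h]
      simp [dfsFor, List.find?, h, ih]

-- A's recursion equals B's step/driver pair at every fuel
theorem dfsA_eq_dfsRun (n : Nat) : ∀ (current previous flowers count : Int)
    (graph : List (Int × List (Int × Int))) (f end_ : Int),
    dfsA n current previous flowers count graph f end_ =
      dfsRun graph f end_ n (current, previous, flowers) := by
  induction n with
  | zero => intro current previous flowers count graph f end_; rfl
  | succ n ih =>
    intro current previous flowers count graph f end_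
    simp only [dfsA, dfsRun, dfsStep, dfsFor_eq_find]
    split_ifs <;> try rfl
    cases List.lookup current graph with
    | none => rfl
    | some adj =>
      dsimp only
      cases adj.find? (fun p => p.1 != previous) with
      | none => rfl
      | some c =>
        obtain ⟨city, wt⟩ := c
        dsimp only
        cases List.lookup city graph with
        | none => rfl
        | some adj2 =>
          dsimp only
          cases List.lookup current adj2 with
          | none => rfl
          | some w => exact ih city current w count graph f end_

-- ===== VERDICT (by name: the statement is the Claim_ definition above) =====
theorem dfs_spec : Claim_equal_dfs := by
  intro current previous flowers count graph f end_ _ _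
  unfold Spec_dfs dfs dfs_alt
  exact dfsA_eq_dfsRun _ current previous flowers count graph f end_
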